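-- pv_equiv track=rewrite | github.com/vyalsgh-tech/my-timetable-next | tools/step42_memo_followup_focus_strike_click_fix.py | find_function_bounds
-- ===== SOURCE A (Python) =====
-- def find_function_bounds(text: str, func_name: str):
--     start = text.find(f"    def {func_name}(")
--     if start == -1:
--         return None, None
--     candidates = []
--     for marker in ["\n    def ", "\n    # =========================================="]:
--         pos = text.find(marker, start + 10)
--         if pos != -1:
--             candidates.append(pos)
--     if not candidates:
--         return start, len(text)
--     return start, min(candidates)
-- ===== SOURCE B (Python) =====
-- def find_function_bounds(text: str, func_name: str):
--     # Line-by-line scan with a running character offset: find the line holding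
--     # the def header, then walk the following lines and stop at the first one
--     # opening a new def or a comment separator, returning the offset of the
--     # newline just before it.
--     pat = f"    def {func_name}("
--     sep = "    # " + "=" * 42
--     lines = text.split("\n")
--     off = 0
--     for i, line in enumerate(lines):
--         j = line.find(pat)
--         if j == -1:
--             off += len(line) + 1
--             continue
--         start = off + j
--         nl = off + len(line)
--         for nxt in lines[i + 1:]:
--             if nxt.startswith("    def ") or nxt.startswith(sep):
--                 return start, nl
--             nl += 1 + len(nxt)
--         return start, len(text)
--     return None, None
-- ===== Notes on version B (the rewrite author's own statement) =====
-- stated objective: alternative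
-- what changed: Replaced the two whole-text str.find calls plus min-of-candidates by a single line-by-line scan keeping a running character offset: one loop locates the line holding the def header, a second loop over the following lines stops at the first one opening a new def or a comment separator; Pre_ excludes degenerate func_names (empty or containing a newline) whose header pattern occurs in the text, where A's whole-text find offset start+10 and cross-line matching are artefacts a line scanner does not reproduce.
-- outside the precondition, e.g. on find_function_bounds('    def (\n    def g():', ''): A returns (0, 22), B returns (0, 9); on find_function_bounds('    def f(\n    def g(', 'f(\n    def g'): A returns (0, 10), B returns (None, None)
import Mathlib
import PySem

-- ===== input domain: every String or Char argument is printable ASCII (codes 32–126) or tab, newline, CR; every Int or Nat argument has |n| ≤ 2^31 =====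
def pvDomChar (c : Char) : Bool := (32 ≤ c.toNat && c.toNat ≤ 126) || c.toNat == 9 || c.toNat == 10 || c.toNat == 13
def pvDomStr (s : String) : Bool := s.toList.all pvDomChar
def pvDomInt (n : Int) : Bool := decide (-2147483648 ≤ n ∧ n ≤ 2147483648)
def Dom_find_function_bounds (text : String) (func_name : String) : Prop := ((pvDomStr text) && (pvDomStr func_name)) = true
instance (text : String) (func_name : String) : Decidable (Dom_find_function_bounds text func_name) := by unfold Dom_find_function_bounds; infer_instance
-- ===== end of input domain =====

-- B replaces A's two whole-text `str.find` calls plus `min` by a line-by-line scan with a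
-- running character offset (objective: alternative decomposition, not faster).

-- ===== PORT A =====
-- the two markers A searches for (A's list literal)
def pvM1 : List Char := "\n    def ".toList
def pvM2 : List Char := "\n    # ==========================================".toList

def find_function_bounds (text : String) (func_name : String) : Option Int × Option Int :=
  let cs := text.toList
  let pat := "    def ".toList ++ func_name.toList ++ "(".toList
  let start := PySem.Chars.find cs pat
  if start = -1 then (none, none)
  else
    let candidates := [pvM1, pvM2].foldl (fun acc m =>
      let pos := PySem.Chars.findFrom cs m (start + 10) none
      if pos ≠ -1 then acc ++ [pos] else acc) ([] : List Int)
    if candidates = [] then (some start, some (cs.length : Int))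
    else (some start, PySem.List.min? candidates (fun x => x))

-- ===== PORT B =====
-- the same two line prefixes, without the leading newline (Source B's `"    def "` and `sep`)
def pvP1 : List Char := "    def ".toList
def pvP2 : List Char := "    # ==========================================".toList

-- Source B's outer loop: first line containing `pat`, its running offset bookkeeping
def pvScanStart (pat : List Char) : List (List Char) → Nat → Option (Nat × Nat × List (List Char))
  | [], _ => none
  | l :: ls, off =>
      let j := PySem.Chars.find l pat
      if j = -1 then pvScanStart pat ls (off + l.length + 1)
      else some (off + j.toNat, off + l.length, ls)

-- Source B's inner loop over the remaining lines, `nl` the offset of the newline before `l`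
def pvScanEnd : List (List Char) → Nat → Option Nat
  | [], _ => none
  | l :: ls, nl =>
      if PySem.Chars.startswith l pvP1 = true ∨ PySem.Chars.startswith l pvP2 = true
      then some nl
      else pvScanEnd ls (nl + 1 + l.length)

def find_function_bounds_alt (text : String) (func_name : String) : Option Int × Option Int :=
  let cs := text.toList
  let pat := "    def ".toList ++ func_name.toList ++ "(".toList
  let lines := PySem.Chars.splitOn cs "\n".toList
  match pvScanStart pat lines 0 with
  | none => (none, none)
  | some (start, nl, rest) =>
    match pvScanEnd rest nl with
    | some e => (some (start : Int), some (e : Int))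
    | none => (some (start : Int), some (cs.length : Int))

-- ===== PRECONDITION & SPEC =====
-- Pre_ excludes degenerate func_names — empty, or containing a newline — whose header
-- pattern actually occurs in text: a function name is never empty or multi-line, and on
-- those inputs A's value hinges on artefacts of its whole-text find (the fixed start+10
-- search offset, matching across line boundaries) that a line scanner does not reproduce.
def Pre_find_function_bounds (text : String) (func_name : String) : Prop :=
  ('\n' ∉ func_name.toList ∧ func_name ≠ "")
    ∨ PySem.Chars.isIn ("    def ".toList ++ func_name.toList ++ "(".toList) text.toList = false
instance (text : String) (func_name : String) : Decidable (Pre_find_function_bounds text func_name) := by unfold Pre_find_function_bounds; infer_instance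

def pvWitness_find_function_bounds : String × String := ("    def f(\n        pass\n    def g(\n", "f")

def Spec_find_function_bounds (text : String) (func_name : String) (out : Option Int × Option Int) : Prop := out = find_function_bounds_alt text func_name
instance (text : String) (func_name : String) (out : Option Int × Option Int) : Decidable (Spec_find_function_bounds text func_name out) := by unfold Spec_find_function_bounds; infer_instance

-- ===== CLAIM (what is proved, stated in full; the proofs are below) =====
def Claim_equal_find_function_bounds : Prop := ∀ (text : String) (func_name : String), Dom_find_function_bounds text func_name → Pre_find_function_bounds text func_name → Spec_find_function_bounds text func_name (find_function_bounds text func_name)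

-- ===== LEMMAS AND PROOFS =====

-- ---- splitOn structure ----

-- reference shape of str.split("\n"): accumulate the current line in `pre`
def pvLinesAux : List Char → List Char → List (List Char)
  | pre, [] => [pre]
  | pre, c :: r => if c = '\n' then pre :: pvLinesAux [] r else pvLinesAux (pre ++ [c]) r

lemma pvGo_nil (f : Nat) (cur : List Char) (acc : List (List Char)) :
    PySem.Chars.splitOn.go ['\n'] f [] cur acc = (cur.reverse :: acc).reverse := by
  cases f <;> rw [PySem.Chars.splitOn.go] <;> simp

lemma pvGo_nl (f : Nat) (rest cur : List Char) (acc : List (List Char)) :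
    PySem.Chars.splitOn.go ['\n'] (f+1) ('\n'::rest) cur acc
      = PySem.Chars.splitOn.go ['\n'] f rest [] (cur.reverse :: acc) := by
  rw [PySem.Chars.splitOn.go]; simp [List.isPrefixOf]

lemma pvGo_ch (f : Nat) (c : Char) (rest cur : List Char) (acc : List (List Char))
    (hc : c ≠ '\n') :
    PySem.Chars.splitOn.go ['\n'] (f+1) (c::rest) cur acc
      = PySem.Chars.splitOn.go ['\n'] f rest (c :: cur) acc := by
  rw [PySem.Chars.splitOn.go]
  simp only [List.isPrefixOf]
  rw [if_neg (by simp [Ne.symm hc])]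

lemma pvGo_eq (l : List Char) : ∀ (fuel : Nat) (cur : List Char) (acc : List (List Char)),
    l.length ≤ fuel →
    PySem.Chars.splitOn.go ['\n'] fuel l cur acc = acc.reverse ++ pvLinesAux cur.reverse l := by
  induction l with
  | nil =>
      intro fuel cur acc _
      rw [pvGo_nil]
      simp [pvLinesAux]
  | cons c rest ih =>
      intro fuel cur acc hf
      cases fuel with
      | zero => simp at hf
      | succ f =>
        by_cases hc : c = '\n'
        · subst hc
          rw [pvGo_nl, ih f [] (cur.reverse :: acc) (by simpa using hf)]
          simp [pvLinesAux]
        · rw [pvGo_ch f c rest cur acc hc, ih f (c :: cur) acc (by simpa using hf)]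
          simp [pvLinesAux, hc]

lemma pvSplitOn_eq (cs : List Char) : PySem.Chars.splitOn cs ['\n'] = pvLinesAux [] cs := by
  rw [PySem.Chars.splitOn, pvGo_eq cs (cs.length + 1) [] [] (by omega)]
  simp

lemma pvLinesAux_no_nl {l : List Char} (hl : '\n' ∉ l) (pre : List Char) :
    pvLinesAux pre l = [pre ++ l] := by
  induction l generalizing pre with
  | nil => simp [pvLinesAux]
  | cons c r ih =>
      simp only [List.mem_cons, not_or] at hl
      simp [pvLinesAux, Ne.symm hl.1, ih hl.2]

lemma pvLinesAux_split {l : List Char} (hl : '\n' ∉ l) (pre r : List Char) :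
    pvLinesAux pre (l ++ '\n' :: r) = (pre ++ l) :: pvLinesAux [] r := by
  induction l generalizing pre with
  | nil => simp [pvLinesAux]
  | cons c l' ih =>
      simp only [List.mem_cons, not_or] at hl
      simp [pvLinesAux, Ne.symm hl.1, ih hl.2]

-- every list of chars is newline-free or splits at its first newline
lemma pvDecomp (cs : List Char) : '\n' ∉ cs ∨ ∃ l r, cs = l ++ '\n' :: r ∧ '\n' ∉ l := by
  induction cs with
  | nil => simp
  | cons c r ih =>
      by_cases hc : c = '\n'
      · exact Or.inr ⟨[], r, by simp [hc], by simp⟩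
      · rcases ih with h | ⟨l, r', rfl, hl⟩
        · exact Or.inl (by simp [Ne.symm hc, h])
        · exact Or.inr ⟨c :: l, r', by simp, by simp [Ne.symm hc, hl]⟩

-- ---- prefixes and find across the line structure ----

lemma pvPrefix_line {p l : List Char} (w : List Char) (hp0 : p ≠ []) (hp : '\n' ∉ p)
    (hl : '\n' ∉ l) : p <+: (l ++ '\n' :: w) ↔ p <+: l := by
  constructor
  · intro h
    by_cases hlen : p.length ≤ l.length
    · rw [List.prefix_iff_eq_take, List.take_append_of_le_length hlen] at h
      exact h ▸ List.take_prefix _ _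
    · exfalso
      have hlt : l.length < p.length := by omega
      have hget := h.getElem (i := l.length) hlt
      have : p[l.length] = '\n' := by
        rw [hget]
        simp
      exact hp (this ▸ List.getElem_mem hlt)
  · intro h
    exact h.trans (List.prefix_append l _)

lemma pvFind_eq_of {s p : List Char} (j : Nat) (h1 : p <+: s.drop j)
    (h2 : ∀ i < j, ¬ p <+: s.drop i) : PySem.Chars.find s p = (j : Int) := by
  have hin : PySem.Chars.isIn p s = true :=
    (PySem.Chars.exists_prefix_drop_iff_isIn p s).1 ⟨j, h1⟩
  have hnn : 0 ≤ PySem.Chars.find s p :=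
    (PySem.Chars.find_nonneg_iff s p).2 ((PySem.Chars.isIn_iff_infix p s).1 hin)
  obtain ⟨hpre, hmin⟩ := PySem.Chars.find_spec hnn
  have htn : (PySem.Chars.find s p).toNat = j := by
    rcases lt_trichotomy (PySem.Chars.find s p).toNat j with h' | h' | h'
    · exact absurd hpre (h2 _ h')
    · exact h'
    · exact absurd h1 (hmin j h')
  omega

lemma pvFind_neg_iff {s p : List Char} :
    PySem.Chars.find s p = -1 ↔ ∀ i, ¬ p <+: s.drop i := by
  rw [PySem.Chars.find_eq_neg_one_iff, ← PySem.Chars.isIn_iff_infix,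
    ← PySem.Chars.exists_prefix_drop_iff_isIn]
  push Not
  rfl

lemma pvDrop_shift (l r : List Char) (c : Char) (k : Nat) :
    (l ++ c :: r).drop (l.length + 1 + k) = r.drop k := by
  rw [show l ++ c :: r = (l ++ [c]) ++ r by simp, List.drop_append,
    List.drop_eq_nil_of_le (by simp), List.nil_append]
  congr 1
  simp only [List.length_append, List.length_cons, List.length_nil]
  omega

lemma pvFind_line {p l r : List Char} (hp0 : p ≠ []) (hp : '\n' ∉ p) (hl : '\n' ∉ l) :
    PySem.Chars.find (l ++ '\n' :: r) p =
      if PySem.Chars.find l p = -1 then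
        (if PySem.Chars.find r p = -1 then -1 else (l.length + 1 : Int) + PySem.Chars.find r p)
      else PySem.Chars.find l p := by
  have hdropl : ∀ i, '\n' ∉ l.drop i := fun i hm => hl (List.mem_of_mem_drop hm)
  by_cases h1 : PySem.Chars.find l p = -1
  · have hno_l : ∀ i, ¬ p <+: l.drop i := (pvFind_neg_iff).1 h1
    have hnot_mid : ∀ i, i ≤ l.length → ¬ p <+: (l ++ '\n' :: r).drop i := by
      intro i hi hpre
      rcases eq_or_lt_of_le hi with hi' | hi'
      · subst hi'
        rw [List.drop_append_of_le_length le_rfl, List.drop_length, List.nil_append] at hpre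
        cases p with
        | nil => exact hp0 rfl
        | cons c p' =>
            rw [List.cons_prefix_cons] at hpre
            exact hp (by simp [hpre.1])
      · rw [List.drop_append_of_le_length (le_of_lt hi'),
          pvPrefix_line _ hp0 hp (hdropl i)] at hpre
        exact hno_l i hpre
    have hhigh : ∀ k, (l ++ '\n' :: r).drop (l.length + 1 + k) = r.drop k :=
      pvDrop_shift l r '\n'
    rw [if_pos h1]
    by_cases h2 : PySem.Chars.find r p = -1
    · have hno_r : ∀ i, ¬ p <+: r.drop i := (pvFind_neg_iff).1 h2
      rw [if_pos h2, pvFind_neg_iff]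
      intro i
      by_cases hi : i ≤ l.length
      · exact hnot_mid i hi
      · obtain ⟨k, rfl⟩ : ∃ k, i = l.length + 1 + k := ⟨i - l.length - 1, by omega⟩
        rw [hhigh]
        exact hno_r k
    · have hnn2 : 0 ≤ PySem.Chars.find r p := by
        have h' := PySem.Chars.neg_one_le_find r p
        omega
      obtain ⟨hpre2, hmin2⟩ := PySem.Chars.find_spec hnn2
      rw [if_neg h2]
      have := pvFind_eq_of (s := l ++ '\n' :: r) (p := p)
        (l.length + 1 + (PySem.Chars.find r p).toNat)
        (by rw [hhigh]; exact hpre2)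
        (by
          intro i hi hpre
          by_cases hi' : i ≤ l.length
          · exact hnot_mid i hi' hpre
          · obtain ⟨k, rfl⟩ : ∃ k, i = l.length + 1 + k := ⟨i - l.length - 1, by omega⟩
            rw [hhigh] at hpre
            exact hmin2 k (by omega) hpre)
      rw [this]
      push_cast
      omega
  · have hnn1 : 0 ≤ PySem.Chars.find l p := by
      have := PySem.Chars.neg_one_le_find l p
      omega
    obtain ⟨hpre1, hmin1⟩ := PySem.Chars.find_spec hnn1
    have hle : (PySem.Chars.find l p).toNat ≤ l.length := by
      have := PySem.Chars.find_le_length l p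
      omega
    rw [if_neg h1]
    have := pvFind_eq_of (s := l ++ '\n' :: r) (p := p) (PySem.Chars.find l p).toNat
      (by
        rw [List.drop_append_of_le_length hle]
        exact hpre1.trans (List.prefix_append _ _))
      (by
        intro i hi hpre
        rw [List.drop_append_of_le_length (by omega),
          pvPrefix_line _ hp0 hp (hdropl i)] at hpre
        exact hmin1 i hi hpre)
    rw [this]
    omega

-- ---- the end offset of the line containing position j ----

def pvLineEnd (cs : List Char) (j : Nat) : Nat :=
  j + ((cs.drop j).takeWhile (fun c => c ≠ '\n')).length

lemma pvTakeWhile_all {x : List Char} (hx : '\n' ∉ x) :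
    x.takeWhile (fun c => c ≠ '\n') = x := by
  induction x with
  | nil => simp
  | cons c x' ih =>
      simp only [List.mem_cons, not_or] at hx
      rw [List.takeWhile_cons_of_pos (by simp [Ne.symm hx.1]), ih hx.2]

lemma pvTakeWhile_line {x : List Char} (hx : '\n' ∉ x) (w : List Char) :
    (x ++ '\n' :: w).takeWhile (fun c => c ≠ '\n') = x := by
  induction x with
  | nil => rw [List.nil_append, List.takeWhile_cons_of_neg (by simp)]
  | cons c x' ih =>
      simp only [List.mem_cons, not_or] at hx
      rw [List.cons_append, List.takeWhile_cons_of_pos (by simp [Ne.symm hx.1]), ih hx.2]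

lemma pvLineEnd_le (cs : List Char) (j : Nat) (hj : j ≤ cs.length) :
    pvLineEnd cs j ≤ cs.length := by
  have h := (List.takeWhile_prefix (l := cs.drop j) (fun c => c ≠ '\n')).length_le
  simp only [List.length_drop] at h
  unfold pvLineEnd
  omega

-- a newline-free prefix of cs.drop j keeps the line going at least that far
lemma pvTakeWhile_ge {p : List Char} (hp : '\n' ∉ p) :
    ∀ {x : List Char}, p <+: x → p.length ≤ (x.takeWhile (fun c => c ≠ '\n')).length := by
  induction p with
  | nil => intro x _; simp
  | cons c p' ih =>
      intro x hpre
      simp only [List.mem_cons, not_or] at hp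
      obtain ⟨t, rfl⟩ := hpre
      rw [List.cons_append, List.takeWhile_cons_of_pos (by simp [Ne.symm hp.1])]
      simp only [List.length_cons, Nat.add_le_add_iff_right]
      exact ih hp.2 (List.prefix_append p' t)

lemma pvLineEnd_no_nl (cs : List Char) (j : Nat) :
    ∀ i, j ≤ i → i < pvLineEnd cs j → cs[i]? ≠ some '\n' := by
  intro i hji hi
  unfold pvLineEnd at hi
  set t := (cs.drop j).takeWhile (fun c => c ≠ '\n') with ht
  have hk : i - j < t.length := by omega
  have hlen : t.length ≤ (cs.drop j).length :=
    (List.takeWhile_prefix _).length_le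
  have hilen : i < cs.length := by
    simp only [List.length_drop] at hlen
    omega
  have hget : t[i - j] = (cs.drop j)[i - j]'(by omega) :=
    (List.takeWhile_prefix _).getElem hk
  have hmem : t[i - j] ∈ t := List.getElem_mem hk
  have hpred := List.mem_takeWhile_imp hmem
  simp only [decide_eq_true_eq] at hpred
  have : (cs.drop j)[i - j]'(by omega) = cs[i]'(by omega) := by
    rw [List.getElem_drop]
    congr 1
    omega
  rw [List.getElem?_eq_getElem hilen]
  intro hcontra
  apply hpred
  rw [hget, this]
  simpa using hcontra

lemma pvTakeWhile_getElem_length {α : Type} (p : α → Bool) :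
    ∀ (l : List α), (h : (l.takeWhile p).length < l.length) →
      p (l[(l.takeWhile p).length]'h) = false := by
  intro l
  induction l with
  | nil => intro h; simp at h
  | cons c r ih =>
      intro h
      by_cases hc : p c
      · simp only [List.takeWhile_cons_of_pos hc, List.length_cons, List.getElem_cons_succ]
        exact ih (by
          have h' := h
          simp only [List.takeWhile_cons_of_pos hc, List.length_cons] at h'
          omega)
      · simp only [List.takeWhile_cons_of_neg (by simpa using hc), List.length_nil,
          List.getElem_cons_zero]
        simpa using hc

lemma pvLineEnd_nl (cs : List Char) (j : Nat) (hj : j ≤ cs.length)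
    (h : pvLineEnd cs j < cs.length) :
    cs[pvLineEnd cs j]? = some '\n' := by
  unfold pvLineEnd at h ⊢
  set t := (cs.drop j).takeWhile (fun c => c ≠ '\n') with ht
  have hlt : t.length < (cs.drop j).length := by
    simp only [List.length_drop]
    omega
  have hfail := pvTakeWhile_getElem_length (fun c => c ≠ '\n') (cs.drop j) hlt
  simp only [decide_eq_false_iff_not, not_not] at hfail
  have hidx : (cs.drop j)[t.length]'hlt = cs[j + t.length]'(by
      simp only [List.length_drop] at hlt; omega) := List.getElem_drop
  rw [List.getElem?_eq_getElem (by simp only [List.length_drop] at hlt; omega)]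
  rw [← hidx, hfail]

-- ---- characterization of Source B's outer loop ----

lemma pvFind_nil {p : List Char} (hp0 : p ≠ []) : PySem.Chars.find [] p = -1 := by
  rw [pvFind_neg_iff]
  intro i h
  rw [List.drop_nil] at h
  exact hp0 (List.prefix_nil.1 h)

lemma pvB1 (pat : List Char) (hp0 : pat ≠ []) (hp : '\n' ∉ pat) :
    ∀ n cs off, cs.length ≤ n →
    pvScanStart pat (pvLinesAux [] cs) off =
      if PySem.Chars.find cs pat = -1 then none
      else
        let j := (PySem.Chars.find cs pat).toNat
        let e := pvLineEnd cs j
        some (off + j, off + e,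
          if e = cs.length then [] else pvLinesAux [] (cs.drop (e + 1))) := by
  intro n
  induction n with
  | zero =>
      intro cs off hlen
      have hcs : cs = [] := List.eq_nil_of_length_eq_zero (by omega)
      subst hcs
      rw [if_pos (pvFind_nil hp0)]
      simp [pvLinesAux, pvScanStart, pvFind_nil hp0]
  | succ n' ih =>
      intro cs off hlen
      rcases pvDecomp cs with hno | ⟨l, r, rfl, hl⟩
      · rw [pvLinesAux_no_nl hno, List.nil_append]
        by_cases hf : PySem.Chars.find cs pat = -1
        · rw [if_pos hf]
          simp [pvScanStart, hf]
        · rw [if_neg hf]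
          have hnn : 0 ≤ PySem.Chars.find cs pat := by
            have := PySem.Chars.neg_one_le_find cs pat
            omega
          have hle : (PySem.Chars.find cs pat).toNat ≤ cs.length := by
            have := PySem.Chars.find_le_length cs pat
            omega
          have hE : pvLineEnd cs (PySem.Chars.find cs pat).toNat = cs.length := by
            unfold pvLineEnd
            rw [pvTakeWhile_all (fun hm => hno (List.mem_of_mem_drop hm))]
            simp only [List.length_drop]
            omega
          simp only [pvScanStart, hf, hE]
          simp
      · rw [pvLinesAux_split hl, List.nil_append, pvFind_line hp0 hp hl]
        have hlencs : (l ++ '\n' :: r).length = l.length + 1 + r.length := by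
          simp
          omega
        by_cases h1 : PySem.Chars.find l pat = -1
        · rw [if_pos h1]
          have hstep : pvScanStart pat (l :: pvLinesAux [] r) off
              = pvScanStart pat (pvLinesAux [] r) (off + l.length + 1) := by
            simp [pvScanStart, h1]
          rw [hstep, ih r (off + l.length + 1) (by omega)]
          by_cases h2 : PySem.Chars.find r pat = -1
          · simp [h2]
          · have hnn2 : 0 ≤ PySem.Chars.find r pat := by
              have := PySem.Chars.neg_one_le_find r pat
              omega
            have hsh : ¬ ((l.length : Int) + 1 + PySem.Chars.find r pat = -1) := by omega
            simp only [if_neg h2, if_neg hsh]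
            have htn : ((l.length : Int) + 1 + PySem.Chars.find r pat).toNat
                = l.length + 1 + (PySem.Chars.find r pat).toNat := by omega
            have hEE : pvLineEnd (l ++ '\n' :: r) (l.length + 1 + (PySem.Chars.find r pat).toNat)
                = l.length + 1 + pvLineEnd r (PySem.Chars.find r pat).toNat := by
              unfold pvLineEnd
              rw [pvDrop_shift]
              omega
            have hdropE : (l ++ '\n' :: r).drop
                  (l.length + 1 + pvLineEnd r (PySem.Chars.find r pat).toNat + 1)
                = r.drop (pvLineEnd r (PySem.Chars.find r pat).toNat + 1) := by
              rw [show l.length + 1 + pvLineEnd r (PySem.Chars.find r pat).toNat + 1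
                  = l.length + 1 + (pvLineEnd r (PySem.Chars.find r pat).toNat + 1) by omega]
              exact pvDrop_shift l r '\n' _
            simp only [htn, hEE, hdropE, hlencs]
            have hiff : (l.length + 1 + pvLineEnd r (PySem.Chars.find r pat).toNat
                = l.length + 1 + r.length)
                ↔ (pvLineEnd r (PySem.Chars.find r pat).toNat = r.length) := by omega
            by_cases he : pvLineEnd r (PySem.Chars.find r pat).toNat = r.length
            · rw [if_pos he, if_pos (hiff.2 he)]
              simp only [Option.some.injEq, Prod.mk.injEq]
              refine ⟨by omega, by omega, trivial⟩
            · rw [if_neg he, if_neg (fun hc => he (hiff.1 hc))]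
              simp only [Option.some.injEq, Prod.mk.injEq]
              refine ⟨by omega, by omega, trivial⟩
        · rw [if_neg h1]
          have hnn1 : 0 ≤ PySem.Chars.find l pat := by
            have := PySem.Chars.neg_one_le_find l pat
            omega
          have hle1 : (PySem.Chars.find l pat).toNat ≤ l.length := by
            have := PySem.Chars.find_le_length l pat
            omega
          have hstep : pvScanStart pat (l :: pvLinesAux [] r) off
              = some (off + (PySem.Chars.find l pat).toNat, off + l.length, pvLinesAux [] r) := by
            simp [pvScanStart, h1]
          rw [hstep, if_neg h1]
          have hE : pvLineEnd (l ++ '\n' :: r) (PySem.Chars.find l pat).toNat = l.length := by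
            unfold pvLineEnd
            rw [List.drop_append_of_le_length hle1,
              pvTakeWhile_line (fun hm => hl (List.mem_of_mem_drop hm))]
            simp only [List.length_drop]
            omega
          have hdropE : (l ++ '\n' :: r).drop (l.length + 1) = r := by
            have h0 := pvDrop_shift l r '\n' 0
            simp only [Nat.add_zero, List.drop_zero] at h0
            exact h0
          simp only [hE, hlencs, hdropE]
          rw [if_neg (by omega : ¬ (l.length = l.length + 1 + r.length))]

-- ---- characterization of Source B's inner loop ----

def pvMark (cs : List Char) (e : Nat) : Prop :=
  pvM1 <+: cs.drop e ∨ pvM2 <+: cs.drop e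

lemma pvM1_eq : pvM1 = '\n' :: pvP1 := rfl

lemma pvM2_eq : pvM2 = '\n' :: pvP2 := rfl

lemma pvCons_prefix_drop {p : List Char} {c : Char} {cs : List Char} {i : Nat}
    (h : (c :: p) <+: cs.drop i) : cs[i]? = some c := by
  cases hc : cs.drop i with
  | nil => rw [hc, List.prefix_nil] at h; exact absurd h (by simp)
  | cons a t =>
      rw [hc, List.cons_prefix_cons] at h
      rw [← List.head?_drop, hc]
      simp [h.1]

lemma pvMark_nl {cs : List Char} {i : Nat} (h : pvMark cs i) : cs[i]? = some '\n' := by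
  rcases h with h | h
  · rw [pvM1_eq] at h
    exact pvCons_prefix_drop h
  · rw [pvM2_eq] at h
    exact pvCons_prefix_drop h

lemma pvMark_lt {cs : List Char} {i : Nat} (h : pvMark cs i) : i < cs.length := by
  have := pvMark_nl h
  rw [List.getElem?_eq_some_iff] at this
  exact this.1

lemma pvMark_at_nl {cs u : List Char} {nl : Nat} (hdrop : cs.drop nl = '\n' :: u) :
    pvMark cs nl ↔ (pvP1 <+: u ∨ pvP2 <+: u) := by
  unfold pvMark
  rw [hdrop, pvM1_eq, pvM2_eq, List.cons_prefix_cons, List.cons_prefix_cons]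
  simp

lemma pvElem_after {cs u : List Char} {nl i : Nat} (hdrop : cs.drop nl = '\n' :: u)
    (hi : nl < i) : cs[i]? = u[i - nl - 1]? := by
  have h1 : cs[i]? = (cs.drop nl)[i - nl]? := by
    rw [List.getElem?_drop]
    congr 1
    omega
  rw [h1, hdrop, show i - nl = (i - nl - 1) + 1 by omega]
  simp

lemma pvB2 (cs : List Char) :
    ∀ n u nl, u.length ≤ n → cs.drop nl = '\n' :: u →
    (match pvScanEnd (pvLinesAux [] u) nl with
     | some e => nl ≤ e ∧ pvMark cs e ∧ ∀ i, nl ≤ i → i < e → ¬ pvMark cs i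
     | none => ∀ i, nl ≤ i → ¬ pvMark cs i) := by
  intro n
  induction n with
  | zero =>
      intro u nl hlen hdrop
      have hu : u = [] := List.eq_nil_of_length_eq_zero (by omega)
      subst hu
      have hg : ¬ (PySem.Chars.startswith ([] : List Char) pvP1 = true ∨ PySem.Chars.startswith ([] : List Char) pvP2 = true) := by
        intro hg
        rcases hg with hs | hs
        · exact absurd (List.prefix_nil.1 ((PySem.Chars.startswith_iff [] pvP1).1 hs)) (by decide)
        · exact absurd (List.prefix_nil.1 ((PySem.Chars.startswith_iff [] pvP2).1 hs)) (by decide)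
      have hsc : pvScanEnd (pvLinesAux [] []) nl = none := by
        simp [pvLinesAux, pvScanEnd, hg]
      rw [hsc]
      intro i hnli hm
      rcases eq_or_lt_of_le hnli with heq | hlt
      · rw [← heq, pvMark_at_nl hdrop] at hm
        rcases hm with hm | hm
        · exact absurd (List.prefix_nil.1 hm) (by decide)
        · exact absurd (List.prefix_nil.1 hm) (by decide)
      · have := pvMark_nl hm
        rw [pvElem_after hdrop hlt] at this
        simp at this
  | succ n' ih =>
      intro u nl hlen hdrop
      rcases pvDecomp u with hno | ⟨l, u', rfl, hl⟩
      · rw [pvLinesAux_no_nl hno, List.nil_append]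
        by_cases hg : PySem.Chars.startswith u pvP1 = true ∨ PySem.Chars.startswith u pvP2 = true
        · have hsc : pvScanEnd [u] nl = some nl := by
            simp [pvScanEnd, hg]
          rw [hsc]
          refine ⟨le_rfl, ?_, fun i hnli hlt hm => by omega⟩
          rw [pvMark_at_nl hdrop]
          rcases hg with hs | hs
          · exact Or.inl ((PySem.Chars.startswith_iff u pvP1).1 hs)
          · exact Or.inr ((PySem.Chars.startswith_iff u pvP2).1 hs)
        · have hsc : pvScanEnd [u] nl = none := by
            simp only [pvScanEnd, if_neg hg]
          rw [hsc]
          intro i hnli hm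
          rcases eq_or_lt_of_le hnli with heq | hlt
          · rw [← heq, pvMark_at_nl hdrop] at hm
            apply hg
            rcases hm with hm | hm
            · exact Or.inl ((PySem.Chars.startswith_iff u pvP1).2 hm)
            · exact Or.inr ((PySem.Chars.startswith_iff u pvP2).2 hm)
          · have hc := pvMark_nl hm
            rw [pvElem_after hdrop hlt] at hc
            exact hno (List.mem_of_getElem? hc)
      · rw [pvLinesAux_split hl, List.nil_append]
        have hdrop' : cs.drop (nl + 1 + l.length) = '\n' :: u' := by
          have h1 : cs.drop (nl + 1 + l.length) = (cs.drop nl).drop (1 + l.length) := by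
            rw [List.drop_drop]
            congr 1
            omega
          rw [h1, hdrop, show 1 + l.length = l.length + 1 by omega]
          rw [List.drop_succ_cons]
          exact List.drop_left' rfl
        by_cases hg : PySem.Chars.startswith l pvP1 = true ∨ PySem.Chars.startswith l pvP2 = true
        · have hsc : pvScanEnd (l :: pvLinesAux [] u') nl = some nl := by
            simp [pvScanEnd, hg]
          rw [hsc]
          refine ⟨le_rfl, ?_, fun i hnli hlt hm => by omega⟩
          rw [pvMark_at_nl hdrop]
          rcases hg with hs | hs
          · exact Or.inl (((pvPrefix_line u' (by decide) (by decide) hl).2)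
              ((PySem.Chars.startswith_iff l pvP1).1 hs))
          · exact Or.inr (((pvPrefix_line u' (by decide) (by decide) hl).2)
              ((PySem.Chars.startswith_iff l pvP2).1 hs))
        · have hsc : pvScanEnd (l :: pvLinesAux [] u') nl
              = pvScanEnd (pvLinesAux [] u') (nl + 1 + l.length) := by
            simp only [pvScanEnd, if_neg hg]
          rw [hsc]
          have hmid : ∀ i, nl ≤ i → i < nl + 1 + l.length → ¬ pvMark cs i := by
            intro i hnli hup hm
            rcases eq_or_lt_of_le hnli with heq | hlt
            · rw [← heq, pvMark_at_nl hdrop] at hm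
              apply hg
              rcases hm with hm | hm
              · exact Or.inl ((PySem.Chars.startswith_iff l pvP1).2
                  ((pvPrefix_line u' (by decide) (by decide) hl).1 hm))
              · exact Or.inr ((PySem.Chars.startswith_iff l pvP2).2
                  ((pvPrefix_line u' (by decide) (by decide) hl).1 hm))
            · have hc := pvMark_nl hm
              rw [pvElem_after hdrop hlt,
                List.getElem?_append_left (by omega : i - nl - 1 < l.length)] at hc
              exact hl (List.mem_of_getElem? hc)
          have hih := ih u' (nl + 1 + l.length) (by simp at hlen; omega) hdrop'
          cases hres : pvScanEnd (pvLinesAux [] u') (nl + 1 + l.length) with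
          | none =>
              rw [hres] at hih
              intro i hnli hm
              by_cases hi : i < nl + 1 + l.length
              · exact hmid i hnli hi hm
              · exact hih i (by omega) hm
          | some e =>
              rw [hres] at hih
              obtain ⟨he1, he2, he3⟩ := hih
              refine ⟨by omega, he2, ?_⟩
              intro i hnli hlt hm
              by_cases hi : i < nl + 1 + l.length
              · exact hmid i hnli hi hm
              · exact he3 i (by omega) hlt hm

-- ---- A-side helpers ----

lemma pvFindFrom_gt_len {cs m : List Char} {k : Int} (h : (cs.length : Int) < k) :
    PySem.Chars.findFrom cs m k none = -1 := by
  rw [PySem.Chars.findFrom]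
  rw [if_neg (by omega : ¬ (k < 0))]
  rw [if_pos (by omega)]

lemma pvLines_infix : ∀ n cs, cs.length ≤ n → ∀ x ∈ pvLinesAux [] cs, x <:+: cs := by
  intro n
  induction n with
  | zero =>
      intro cs hlen x hx
      have hcs : cs = [] := List.eq_nil_of_length_eq_zero (by omega)
      subst hcs
      simp [pvLinesAux] at hx
      simp [hx]
  | succ n' ih =>
      intro cs hlen x hx
      rcases pvDecomp cs with hno | ⟨l, r, rfl, hl⟩
      · rw [pvLinesAux_no_nl hno, List.nil_append] at hx
        simp at hx
        simp [hx]
      · rw [pvLinesAux_split hl, List.nil_append] at hx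
        rcases List.mem_cons.1 hx with rfl | hx'
        · exact ⟨[], '\n' :: r, by simp⟩
        · have hxr : x <:+: r := ih r (by simp at hlen; omega) x hx'
          exact hxr.trans ⟨l ++ ['\n'], [], by simp⟩

lemma pvScanStart_none (pat : List Char) :
    ∀ (lines : List (List Char)) (off : Nat),
    (∀ l ∈ lines, PySem.Chars.find l pat = -1) → pvScanStart pat lines off = none := by
  intro lines
  induction lines with
  | nil => intro off _; rfl
  | cons l ls ih =>
      intro off hall
      have hl := hall l (by simp)
      simp only [pvScanStart, hl, if_pos rfl]
      exact ih _ (fun l' hl' => hall l' (by simp [hl']))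

lemma pvOcc_lt {cs m : List Char} {i : Nat} (hm0 : m ≠ []) (h : m <+: cs.drop i) :
    i < cs.length := by
  by_contra hge
  rw [List.drop_eq_nil_of_le (by omega), List.prefix_nil] at h
  exact hm0 h

lemma pvPos_spec (cs m : List Char) (k : Nat) (hm0 : m ≠ []) :
    (PySem.Chars.findFrom cs m (k : Int) none = -1 ∧ ∀ i, k ≤ i → ¬ m <+: cs.drop i)
    ∨ (0 ≤ PySem.Chars.findFrom cs m (k : Int) none
       ∧ k ≤ (PySem.Chars.findFrom cs m (k : Int) none).toNat
       ∧ m <+: cs.drop (PySem.Chars.findFrom cs m (k : Int) none).toNat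
       ∧ ∀ i, k ≤ i → i < (PySem.Chars.findFrom cs m (k : Int) none).toNat →
           ¬ m <+: cs.drop i) := by
  by_cases hk : k ≤ cs.length
  · by_cases hne : PySem.Chars.findFrom cs m (k : Int) none = -1
    · left
      refine ⟨hne, ?_⟩
      have hno := (PySem.Chars.findFrom_natCast_eq_neg_one_iff cs m k hk).1 hne
      intro i hki hpre
      apply hno
      have hocc : m <+: (cs.drop k).drop (i - k) := by
        rw [List.drop_drop, show k + (i - k) = i by omega]
        exact hpre
      exact (PySem.Chars.isIn_iff_infix m (cs.drop k)).1
        ((PySem.Chars.exists_prefix_drop_iff_isIn m (cs.drop k)).1 ⟨i - k, hocc⟩)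
    · right
      obtain ⟨h1, h2, h3⟩ := PySem.Chars.findFrom_natCast_spec cs m k hk hne
      exact ⟨by omega, by omega, h2, h3⟩
  · left
    refine ⟨pvFindFrom_gt_len (by omega), ?_⟩
    intro i hki hpre
    have := pvOcc_lt hm0 hpre
    omega

lemma pvCands (cs : List Char) (s : Int) :
    [pvM1, pvM2].foldl (fun acc m =>
      let pos := PySem.Chars.findFrom cs m s none
      if pos ≠ -1 then acc ++ [pos] else acc) ([] : List Int)
    = (if PySem.Chars.findFrom cs pvM1 s none ≠ -1
        then [PySem.Chars.findFrom cs pvM1 s none] else [])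
      ++ (if PySem.Chars.findFrom cs pvM2 s none ≠ -1
        then [PySem.Chars.findFrom cs pvM2 s none] else []) := by
  simp only [List.foldl]
  split_ifs <;> simp

lemma pvMin1 (a : Int) : PySem.List.min? [a] (fun x => x) = some a := by
  simp [PySem.List.min?, List.foldl]

lemma pvMin2 (a b : Int) :
    PySem.List.min? [a, b] (fun x => x) = some (if b < a then b else a) := by
  simp only [PySem.List.min?, List.foldl]
  split_ifs <;> rfl

-- ===== VERDICT (by name: the statement is the Claim_ definition above) =====
theorem find_function_bounds_spec : Claim_equal_find_function_bounds := by
  intro text fn _ hpre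
  unfold Pre_find_function_bounds at hpre
  unfold Spec_find_function_bounds
  simp only [find_function_bounds, find_function_bounds_alt]
  set cs := text.toList with hcsdef
  set pat := "    def ".toList ++ fn.toList ++ "(".toList with hpatdef
  have hp0 : pat ≠ [] := by rw [hpatdef]; simp
  rw [show "\n".toList = ['\n'] from rfl, pvSplitOn_eq]
  rcases hpre with ⟨hnl, hne⟩ | hni
  · -- the normal case: func_name nonempty, no newline inside it
    have hp : '\n' ∉ pat := by
      rw [hpatdef]
      intro hm
      rcases List.mem_append.1 hm with h1 | h2
      · rcases List.mem_append.1 h1 with ha | hb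
        · exact absurd ha (by decide)
        · exact hnl hb
      · exact absurd h2 (by decide)
    have hnil : fn.toList ≠ [] := fun h => hne (String.toList_eq_nil_iff.mp h)
    have hfl : 1 ≤ fn.toList.length :=
      Nat.pos_of_ne_zero (fun h0 => hnil (List.eq_nil_of_length_eq_zero h0))
    have hpatlen : 10 ≤ pat.length := by
      rw [hpatdef]
      simp only [List.length_append]
      have h8 : ("    def ".toList).length = 8 := by decide
      have h1 : ("(".toList).length = 1 := by decide
      omega
    rw [pvB1 pat hp0 hp cs.length cs 0 le_rfl]
    by_cases hf : PySem.Chars.find cs pat = -1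
    · rw [if_pos hf, if_pos hf]
    · rw [if_neg hf, if_neg hf]
      simp only [Nat.zero_add]
      have hnn : 0 ≤ PySem.Chars.find cs pat := by
        have := PySem.Chars.neg_one_le_find cs pat
        omega
      set s0 := (PySem.Chars.find cs pat).toNat with hs0def
      have hfind : PySem.Chars.find cs pat = (s0 : Int) := by omega
      have hjle : s0 ≤ cs.length := by
        have := PySem.Chars.find_le_length cs pat
        omega
      obtain ⟨hpre0, _⟩ := PySem.Chars.find_spec hnn
      rw [← hs0def] at hpre0
      set e0 := pvLineEnd cs s0 with he0def
      have he0le : e0 ≤ cs.length := he0def ▸ pvLineEnd_le cs s0 hjle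
      -- the header line runs at least pat.length ≥ 10 characters past s0
      have he0k : s0 + 10 ≤ e0 := by
        have := pvTakeWhile_ge hp hpre0
        rw [he0def]
        unfold pvLineEnd
        omega
      have hgap : ∀ i, s0 ≤ i → i < e0 → ¬ pvMark cs i := fun i h1 h2 hm =>
        pvLineEnd_no_nl cs s0 i h1 h2 (pvMark_nl hm)
      rw [hfind, show ((s0 : Int) + 10) = ((s0 + 10 : Nat) : Int) by omega, pvCands]
      set k := s0 + 10 with hkdef
      by_cases he0 : e0 = cs.length
      · -- pattern sits in the last line: no marker newline exists at all
        have hnomark : ∀ i, k ≤ i → ¬ pvMark cs i := by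
          intro i hki hm
          have hl := pvMark_lt hm
          exact hgap i (by omega) (by omega) hm
        have h1 : PySem.Chars.findFrom cs pvM1 (k : Int) none = -1 := by
          rcases pvPos_spec cs pvM1 k (by decide) with ⟨h, _⟩ | ⟨_, hb, hc, _⟩
          · exact h
          · exact absurd (Or.inl hc) (hnomark _ hb)
        have h2 : PySem.Chars.findFrom cs pvM2 (k : Int) none = -1 := by
          rcases pvPos_spec cs pvM2 k (by decide) with ⟨h, _⟩ | ⟨_, hb, hc, _⟩
          · exact h
          · exact absurd (Or.inr hc) (hnomark _ hb)
        rw [if_neg (not_not_intro h1), if_neg (not_not_intro h2), if_pos (by simp), if_pos he0]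
        simp [pvScanEnd]
      · have hlt : e0 < cs.length := by omega
        have hdrop : cs.drop e0 = '\n' :: cs.drop (e0 + 1) := by
          have hnl' := he0def ▸ pvLineEnd_nl cs s0 hjle (he0def ▸ hlt)
          rw [List.getElem?_eq_some_iff] at hnl'
          obtain ⟨hh, hv⟩ := hnl'
          rw [List.drop_eq_getElem_cons hh, hv]
        rw [if_neg he0]
        have hB2 := pvB2 cs (cs.drop (e0 + 1)).length (cs.drop (e0 + 1)) e0 le_rfl hdrop
        cases hres : pvScanEnd (pvLinesAux [] (cs.drop (e0 + 1))) e0 with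
        | none =>
            rw [hres] at hB2
            have hnomark : ∀ i, k ≤ i → ¬ pvMark cs i := by
              intro i hki hm
              by_cases hie : i < e0
              · exact hgap i (by omega) hie hm
              · exact hB2 i (by omega) hm
            have h1 : PySem.Chars.findFrom cs pvM1 (k : Int) none = -1 := by
              rcases pvPos_spec cs pvM1 k (by decide) with ⟨h, _⟩ | ⟨_, hb, hc, _⟩
              · exact h
              · exact absurd (Or.inl hc) (hnomark _ hb)
            have h2 : PySem.Chars.findFrom cs pvM2 (k : Int) none = -1 := by
              rcases pvPos_spec cs pvM2 k (by decide) with ⟨h, _⟩ | ⟨_, hb, hc, _⟩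
              · exact h
              · exact absurd (Or.inr hc) (hnomark _ hb)
            rw [if_neg (not_not_intro h1), if_neg (not_not_intro h2), if_pos (by simp)]
        | some e =>
            rw [hres] at hB2
            obtain ⟨hek, hem, hemin⟩ := hB2
            have hke : k ≤ e := by omega
            have hminall : ∀ i, k ≤ i → i < e → ¬ pvMark cs i := by
              intro i hki hilt hm
              by_cases hie : i < e0
              · exact hgap i (by omega) hie hm
              · exact hemin i (by omega) hilt hm
            rcases pvPos_spec cs pvM1 k (by decide) with ⟨hA1, hN1⟩ | ⟨hP1a, hP1b, hP1c, hP1d⟩ <;>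
              rcases pvPos_spec cs pvM2 k (by decide) with ⟨hA2, hN2⟩ | ⟨hP2a, hP2b, hP2c, hP2d⟩
            · exfalso
              rcases hem with ho | ho
              · exact hN1 e hke ho
              · exact hN2 e hke ho
            · -- only pvM2 occurs
              have he2 : (PySem.Chars.findFrom cs pvM2 (k : Int) none).toNat = e := by
                have hub : ¬ (PySem.Chars.findFrom cs pvM2 (k : Int) none).toNat < e :=
                  fun hc => hminall _ hP2b hc (Or.inr hP2c)
                have hlb : (PySem.Chars.findFrom cs pvM2 (k : Int) none).toNat ≤ e := by
                  rcases hem with ho | ho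
                  · exact absurd ho (hN1 e hke)
                  · by_contra hc
                    exact hP2d e hke (by omega) ho
                omega
              rw [if_neg (not_not_intro hA1), if_pos (by omega : PySem.Chars.findFrom cs pvM2 (k : Int) none ≠ -1)]
              rw [List.nil_append, if_neg (by simp : ¬ ([PySem.Chars.findFrom cs pvM2 (k : Int) none] = ([] : List Int))), pvMin1]
              simp only [Prod.mk.injEq, Option.some.injEq]
              exact ⟨trivial, by omega⟩
            · -- only pvM1 occurs
              have he1 : (PySem.Chars.findFrom cs pvM1 (k : Int) none).toNat = e := by
                have hub : ¬ (PySem.Chars.findFrom cs pvM1 (k : Int) none).toNat < e :=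
                  fun hc => hminall _ hP1b hc (Or.inl hP1c)
                have hlb : (PySem.Chars.findFrom cs pvM1 (k : Int) none).toNat ≤ e := by
                  rcases hem with ho | ho
                  · by_contra hc
                    exact hP1d e hke (by omega) ho
                  · exact absurd ho (hN2 e hke)
                omega
              rw [if_pos (by omega : PySem.Chars.findFrom cs pvM1 (k : Int) none ≠ -1), if_neg (not_not_intro hA2)]
              rw [List.append_nil, if_neg (by simp : ¬ ([PySem.Chars.findFrom cs pvM1 (k : Int) none] = ([] : List Int))), pvMin1]
              simp only [Prod.mk.injEq, Option.some.injEq]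
              exact ⟨trivial, by omega⟩
            · -- both markers occur: A takes the minimum of the two positions
              have hub1 : ¬ (PySem.Chars.findFrom cs pvM1 (k : Int) none).toNat < e :=
                fun hc => hminall _ hP1b hc (Or.inl hP1c)
              have hub2 : ¬ (PySem.Chars.findFrom cs pvM2 (k : Int) none).toNat < e :=
                fun hc => hminall _ hP2b hc (Or.inr hP2c)
              have hlb : (PySem.Chars.findFrom cs pvM1 (k : Int) none).toNat ≤ e
                  ∨ (PySem.Chars.findFrom cs pvM2 (k : Int) none).toNat ≤ e := by
                rcases hem with ho | ho
                · left
                  by_contra hc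
                  exact hP1d e hke (by omega) ho
                · right
                  by_contra hc
                  exact hP2d e hke (by omega) ho
              rw [if_pos (by omega : PySem.Chars.findFrom cs pvM1 (k : Int) none ≠ -1),
                if_pos (by omega : PySem.Chars.findFrom cs pvM2 (k : Int) none ≠ -1)]
              rw [show [PySem.Chars.findFrom cs pvM1 (k : Int) none]
                  ++ [PySem.Chars.findFrom cs pvM2 (k : Int) none]
                  = [PySem.Chars.findFrom cs pvM1 (k : Int) none,
                     PySem.Chars.findFrom cs pvM2 (k : Int) none] from rfl]
              rw [if_neg (by simp), pvMin2]
              simp only [Prod.mk.injEq, Option.some.injEq]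
              refine ⟨trivial, ?_⟩
              split_ifs with hcmp <;> omega
  · -- the pattern does not occur in text: both sides return (none, none)
    have hninf : ¬ pat <:+: cs := (PySem.Chars.isIn_eq_false_iff pat cs).1 hni
    have hf : PySem.Chars.find cs pat = -1 :=
      (PySem.Chars.find_eq_neg_one_iff cs pat).2 hninf
    have hnone : pvScanStart pat (pvLinesAux [] cs) 0 = none := by
      apply pvScanStart_none
      intro l hlmem
      rw [PySem.Chars.find_eq_neg_one_iff]
      intro hinf
      exact hninf (hinf.trans (pvLines_infix cs.length cs le_rfl l hlmem))
    rw [if_pos hf, hnone]
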